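-- pv_equiv track=rewrite | github.com/poleha/codility | min_abs_sum.py | step4
-- ===== SOURCE A (Python) =====
-- def step4(A, n):
--     if n == 0:
--         return {A[0]}
--     else:
--         res = set()
--         for a in step4(A, n - 1):
--             res.add(abs(a - A[n]))
--             res.add(abs(a + A[n]))
--         return res
-- ===== SOURCE B (Python) =====
-- def step4(A, n):
--     def go(i, cur):
--         if i == n:
--             return cur
--         j = i + 1
--         return go(j, {abs(x) for a in cur for x in (a - A[j], a + A[j])})
--     return go(0, {A[0]})
-- ===== Notes on version B (the rewrite author's own statement) =====
-- stated objective: alternative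
-- what changed: Replaced A's top-down recursion on n (result set assembled by a foldl after each recursive call returns) by a bottom-up tail recursion that carries the current set as an accumulator from index 0 up to n, building each next set with a set comprehension.
import Mathlib
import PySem

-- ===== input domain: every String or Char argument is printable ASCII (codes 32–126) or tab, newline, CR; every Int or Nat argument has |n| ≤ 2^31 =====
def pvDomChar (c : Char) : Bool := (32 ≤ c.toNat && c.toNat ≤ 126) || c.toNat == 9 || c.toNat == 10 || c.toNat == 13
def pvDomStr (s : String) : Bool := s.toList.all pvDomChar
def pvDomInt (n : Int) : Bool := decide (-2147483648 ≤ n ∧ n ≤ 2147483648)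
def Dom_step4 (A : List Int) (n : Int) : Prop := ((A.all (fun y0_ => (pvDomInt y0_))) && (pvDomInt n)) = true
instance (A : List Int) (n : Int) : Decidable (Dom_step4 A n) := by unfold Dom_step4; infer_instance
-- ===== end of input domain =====

-- B replaces A's top-down recursion (result assembled after the recursive call returns) by a bottom-up
-- tail recursion carrying the current set as an accumulator; return values are equal as sets.

-- ===== PORT A =====
-- A recurses on n down to 0; the non-negative part of n is the structural measure (Python diverges for n < 0, excluded by Pre_)
def step4Go (A : List Int) : Nat → PySem.Set Int
  | 0 => PySem.Set.ofList [PySem.List.pyGetD A 0 0]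
  | k + 1 =>
      (step4Go A k).foldl (fun res a =>
        PySem.Set.add (PySem.Set.add res |a - PySem.List.pyGetD A ((k : Int) + 1) 0|)
          |a + PySem.List.pyGetD A ((k : Int) + 1) 0|) PySem.Set.empty

def step4 (A : List Int) (n : Int) : List Int := step4Go A n.toNat

-- ===== PORT B =====
-- go(i, cur) counts i upward to n; fuel (n - i).toNat makes the recursion structural (Python diverges/raises outside Pre_)
def step4AltGo (A : List Int) (n : Int) : Nat → Int → PySem.Set Int → PySem.Set Int
  | 0, _, cur => cur
  | f + 1, i, cur =>
      if i == n then cur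
      else
        step4AltGo A n f (i + 1)
          (PySem.Set.ofList (cur.flatMap fun a =>
            [|a - PySem.List.pyGetD A (i + 1) 0|, |a + PySem.List.pyGetD A (i + 1) 0|]))

def step4_alt (A : List Int) (n : Int) : List Int :=
  step4AltGo A n n.toNat 0 (PySem.Set.ofList [PySem.List.pyGetD A 0 0])

-- ===== PRECONDITION & SPEC =====
-- Pre_: Python A raises outside 0 ≤ n < len(A) (RecursionError for n < 0, IndexError for n ≥ len(A) or empty A)
def Pre_step4 (A : List Int) (n : Int) : Prop := 0 ≤ n ∧ n < A.length
instance (A : List Int) (n : Int) : Decidable (Pre_step4 A n) := by unfold Pre_step4; infer_instance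
def pvWitness_step4 : List Int × Int := ([3, -2, 5], 2)

def Spec_step4 (A : List Int) (n : Int) (out : List Int) : Prop := out = step4_alt A n
instance (A : List Int) (n : Int) (out : List Int) : Decidable (Spec_step4 A n out) := by unfold Spec_step4; infer_instance

-- ===== CLAIM (what is proved, stated in full; the proofs are below) =====
def Claim_equal_step4 : Prop := ∀ (A : List Int) (n : Int), Dom_step4 A n → Pre_step4 A n → Spec_step4 A n (step4 A n)

-- ===== LEMMAS AND PROOFS =====

-- proof-only helpers: the shared one-index step, and B's iteration written front-to-back
def pvStep (A : List Int) (j : Int) (s : PySem.Set Int) : PySem.Set Int :=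
  s.foldl (fun res a =>
    PySem.Set.add (PySem.Set.add res |a - PySem.List.pyGetD A j 0|)
      |a + PySem.List.pyGetD A j 0|) PySem.Set.empty

def pvIter (A : List Int) : Int → Nat → PySem.Set Int → PySem.Set Int
  | _, 0, cur => cur
  | i, f + 1, cur => pvIter A (i + 1) f (pvStep A (i + 1) cur)

-- the two loop bodies build the same set: folding Set.add over the flattened pair list is folding the add-pair over cur
theorem step_body_eq (A : List Int) (j : Int) (cur : PySem.Set Int) :
    PySem.Set.ofList (cur.flatMap fun a =>
        [|a - PySem.List.pyGetD A j 0|, |a + PySem.List.pyGetD A j 0|]) =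
      pvStep A j cur := by
  rw [PySem.Set.ofList_eq_foldl, List.foldl_flatMap]
  rfl

-- B's guarded fuel recursion is the plain front-to-back iteration when the fuel is exactly n - i
theorem altGo_eq_iter (A : List Int) (n : Int) :
    ∀ (f : Nat) (i : Int) (cur : PySem.Set Int), i + f = n →
      step4AltGo A n f i cur = pvIter A i f cur := by
  intro f
  induction f with
  | zero => intro i cur _; rfl
  | succ f ih =>
      intro i cur h
      have hne : (i == n) = false := by simp; omega
      simp only [step4AltGo, hne, Bool.false_eq_true, if_false, step_body_eq, pvIter]
      exact ih (i + 1) _ (by push_cast at h ⊢; omega)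

-- peeling the LAST step off the front iteration
theorem iter_succ_last (A : List Int) :
    ∀ (f : Nat) (i : Int) (cur : PySem.Set Int),
      pvIter A i (f + 1) cur = pvStep A (i + (f : Int) + 1) (pvIter A i f cur) := by
  intro f
  induction f with
  | zero => intro i cur; simp [pvIter]
  | succ f ih =>
      intro i cur
      show pvIter A (i + 1) (f + 1) _ = _
      rw [ih]
      show _ = pvStep A (i + (↑f + 1) + 1) (pvIter A (i + 1) f (pvStep A (i + 1) cur))
      ring_nf

-- the front iteration from 0 computes A's recursion
theorem iter_eq_stepGo (A : List Int) (k : Nat) :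
    pvIter A 0 k (PySem.Set.ofList [PySem.List.pyGetD A 0 0]) = step4Go A k := by
  induction k with
  | zero => rfl
  | succ k ih =>
      rw [iter_succ_last, ih]
      show pvStep A (0 + ↑k + 1) _ = _
      rw [show (0 : Int) + ↑k + 1 = ↑k + 1 by ring]
      rfl

-- ===== VERDICT (by name: the statement is the Claim_ definition above) =====
theorem step4_spec : Claim_equal_step4 := by
  intro A n _hDom hPre
  obtain ⟨h0, -⟩ := hPre
  unfold Spec_step4 step4 step4_alt
  rw [altGo_eq_iter A n n.toNat 0 _ (by omega), iter_eq_stepGo]
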